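-- pv_equiv track=rewrite | github.com/azuline/blossom | python/tools/list_errors/__main__.py | _format_tree_output
-- ===== SOURCE A (Python) =====
-- def _format_tree_output(tree: dict[str, list[str]], root_classes: list[str] | None = None) -> str:
--     """Format the inheritance tree in a tree-like structure."""
--     if root_classes is None:
--         # Find root classes (those that appear as parents but not as children)
--         all_children = set()
--         for children in tree.values():
--             all_children.update(children)
--         root_classes = [parent for parent in tree if parent not in all_children]
--         root_classes.sort()
--
--     lines: list[str] = []
--
--     def _format_subtree(class_name: str, prefix: str = "", is_last: bool = True) -> None:
--         # Format current class
--         connector = "└── " if is_last else "├── "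
--         lines.append(f"{prefix}{connector}{class_name}")
--
--         # Format children
--         children = tree.get(class_name, [])
--         children.sort()
--
--         for i, child in enumerate(children):
--             child_is_last = i == len(children) - 1
--             child_prefix = prefix + ("    " if is_last else "│   ")
--             _format_subtree(child, child_prefix, child_is_last)
--
--     for i, root in enumerate(root_classes):
--         is_last_root = i == len(root_classes) - 1
--         _format_subtree(root, "", is_last_root)
--
--     return "\n".join(lines)
-- ===== SOURCE B (Python) =====
-- def _format_tree_output(tree: dict[str, list[str]], root_classes: list[str] | None = None) -> str:
--     """Format the inheritance tree by composing indented blocks bottom-up."""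
--     if root_classes is None:
--         children = {c for kids in tree.values() for c in kids}
--         root_classes = sorted(k for k in tree if k not in children)
--
--     def _render(name: str) -> list[str]:
--         block = [name]
--         kids = sorted(tree.get(name, []))
--         for i, kid in enumerate(kids):
--             conn, ext = ("└── ", "    ") if i == len(kids) - 1 else ("├── ", "│   ")
--             sub = _render(kid)
--             block.append(conn + sub[0])
--             block.extend(ext + line for line in sub[1:])
--         return block
--
--     lines: list[str] = []
--     for i, root in enumerate(root_classes):
--         conn, ext = ("└── ", "    ") if i == len(root_classes) - 1 else ("├── ", "│   ")
--         sub = _render(root)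
--         lines.append(conn + sub[0])
--         lines.extend(ext + line for line in sub[1:])
--     return "\n".join(lines)
-- ===== Notes on version B (the rewrite author's own statement) =====
-- stated objective: alternative
-- what changed: A threads a growing prefix string down a top-down recursion that appends into one shared lines list; B renders each subtree bottom-up as a standalone block of lines and glues connector/extension prefixes onto the child blocks, and it collects the child-name set with one flattening comprehension instead of a set.update loop.
import Mathlib
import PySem

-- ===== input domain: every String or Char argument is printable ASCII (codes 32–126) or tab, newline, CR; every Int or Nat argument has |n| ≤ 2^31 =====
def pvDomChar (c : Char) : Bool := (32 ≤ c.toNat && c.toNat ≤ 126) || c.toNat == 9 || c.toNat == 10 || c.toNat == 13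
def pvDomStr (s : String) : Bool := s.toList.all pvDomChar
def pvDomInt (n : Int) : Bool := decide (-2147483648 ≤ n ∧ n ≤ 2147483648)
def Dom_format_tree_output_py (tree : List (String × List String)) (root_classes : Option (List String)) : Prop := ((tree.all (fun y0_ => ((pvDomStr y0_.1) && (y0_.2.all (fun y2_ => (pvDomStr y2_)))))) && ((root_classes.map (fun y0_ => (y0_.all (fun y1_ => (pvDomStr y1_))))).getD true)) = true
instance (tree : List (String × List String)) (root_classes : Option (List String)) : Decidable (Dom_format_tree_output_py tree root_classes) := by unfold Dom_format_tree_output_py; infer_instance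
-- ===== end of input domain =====

-- B re-decomposes A's prefix-threading recursion as bottom-up block composition (render a subtree
-- without prefixes, then glue connector/extension onto the child block); return-value equivalence
-- only: A additionally sorts the dict's child lists in place, B does not mutate its arguments.

-- ===== PORT A =====
-- fuel (tree.length + 1) is a totality guard only: Python's recursion is unbounded and diverges on
-- cyclic input (excluded by Pre_); on every acyclic input the recursion depth is at most tree.length + 1.
def pvSubtreeA (d : PySem.Dict String (List String)) : Nat → String → String → Bool → List String → List String
  | 0, _, _, _, lines => lines
  | fuel+1, name, pfx, isLast, lines =>
    let connector : String := if isLast then "└── " else "├── "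
    let lines := lines ++ [pfx ++ connector ++ name]
    let children := PySem.List.sorted (PySem.Dict.getD d name []) (fun x => x)
    (PySem.List.enumerate children).foldl
      (fun acc ic =>
        pvSubtreeA d fuel ic.2 (pfx ++ (if isLast then "    " else "│   "))
          (ic.1 == (children.length : Int) - 1) acc)
      lines

def format_tree_output_py (tree : List (String × List String)) (root_classes : Option (List String)) : String :=
  let d := PySem.Dict.ofList tree
  let roots : List String :=
    match root_classes with
    | some rc => rc
    | none =>
      let allChildren := (PySem.Dict.values d).foldl (fun s cs => PySem.Set.update s cs) PySem.Set.empty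
      PySem.List.sorted ((PySem.Dict.keys d).filter (fun p => !(PySem.Set.contains allChildren p))) (fun x => x)
  let lines := (PySem.List.enumerate roots).foldl
    (fun acc ir => pvSubtreeA d (tree.length + 1) ir.2 "" (ir.1 == (roots.length : Int) - 1) acc) []
  PySem.Str.join "\n" lines

-- ===== PORT B =====
-- pvGlueB last sub = "append conn + sub[0]; extend ext + line for line in sub[1:]" of Source B;
-- the [] case is the fuel-exhaustion guard only (Source B's sub is never empty).
def pvGlueB (last : Bool) : List String → List String
  | [] => []
  | h :: t => ((if last then "└── " else "├── ") ++ h) :: t.map (fun l => (if last then "    " else "│   ") ++ l)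

def pvRenderB (d : PySem.Dict String (List String)) : Nat → String → List String
  | 0, _ => []
  | fuel+1, name =>
    let kids := PySem.List.sorted (PySem.Dict.getD d name []) (fun x => x)
    (PySem.List.enumerate kids).foldl
      (fun block ik => block ++ pvGlueB (ik.1 == (kids.length : Int) - 1) (pvRenderB d fuel ik.2))
      [name]

def format_tree_output_py_alt (tree : List (String × List String)) (root_classes : Option (List String)) : String :=
  let d := PySem.Dict.ofList tree
  let roots : List String :=
    match root_classes with
    | some rc => rc
    | none =>
      let childrenSet := PySem.Set.ofList ((PySem.Dict.values d).flatMap (fun kids => kids))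
      PySem.List.sorted ((PySem.Dict.keys d).filter (fun k => !(PySem.Set.contains childrenSet k))) (fun x => x)
  let lines := (PySem.List.enumerate roots).foldl
    (fun acc ir => acc ++ pvGlueB (ir.1 == (roots.length : Int) - 1) (pvRenderB d (tree.length + 1) ir.2)) []
  PySem.Str.join "\n" lines

-- ===== PRECONDITION & SPEC =====
-- Pre_ excludes exactly the inputs on which A's unbounded recursion reaches a cycle of the child
-- graph and raises RecursionError: some class reachable from the traversal roots lies on a cycle.
def pvStepPre (tree : List (String × List String)) (s : List String) : List String :=
  PySem.Set.update s (s.flatMap (fun k => PySem.Dict.getD (PySem.Dict.ofList tree) k []))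

def pvCloseN (tree : List (String × List String)) (s : List String) : Nat → List String
  | 0 => s
  | n+1 => pvStepPre tree (pvCloseN tree s n)

def pvRootsPre (tree : List (String × List String)) (root_classes : Option (List String)) : List String :=
  match root_classes with
  | some rc => rc
  | none => (PySem.Dict.keys (PySem.Dict.ofList tree)).filter
      (fun k => !(decide (k ∈ (PySem.Dict.values (PySem.Dict.ofList tree)).flatMap (fun kids => kids))))

def Pre_format_tree_output_py (tree : List (String × List String)) (root_classes : Option (List String)) : Prop :=
  ∀ k ∈ pvCloseN tree (PySem.Set.ofList (pvRootsPre tree root_classes)) (tree.length + 1),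
    k ∉ pvCloseN tree (PySem.Dict.getD (PySem.Dict.ofList tree) k []) (tree.length + 1)
instance (tree : List (String × List String)) (root_classes : Option (List String)) : Decidable (Pre_format_tree_output_py tree root_classes) := by unfold Pre_format_tree_output_py; infer_instance

def pvWitness_format_tree_output_py : (List (String × List String)) × Option (List String) :=
  ([("Exa", ["B", "A"]), ("A", ["C"])], none)

def Spec_format_tree_output_py (tree : List (String × List String)) (root_classes : Option (List String)) (out : String) : Prop := out = format_tree_output_py_alt tree root_classes
instance (tree : List (String × List String)) (root_classes : Option (List String)) (out : String) : Decidable (Spec_format_tree_output_py tree root_classes out) := by unfold Spec_format_tree_output_py; infer_instance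

-- ===== CLAIM (what is proved, stated in full; the proofs are below) =====
def Claim_equal_format_tree_output_py : Prop := ∀ (tree : List (String × List String)) (root_classes : Option (List String)), Dom_format_tree_output_py tree root_classes → Pre_format_tree_output_py tree root_classes → Spec_format_tree_output_py tree root_classes (format_tree_output_py tree root_classes)

-- ===== LEMMAS AND PROOFS =====

theorem pvSubtreeA_eq_glue (d : PySem.Dict String (List String)) :
    ∀ (fuel : Nat) (name pfx : String) (last : Bool) (lines : List String),
      pvSubtreeA d fuel name pfx last lines
        = lines ++ (pvGlueB last (pvRenderB d fuel name)).map (fun l => pfx ++ l) := by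
  intro fuel
  induction fuel with
  | zero => intro name pfx last lines; simp [pvSubtreeA, pvRenderB, pvGlueB]
  | succ n ih =>
    intro name pfx last lines
    simp only [pvSubtreeA, pvRenderB]
    have hbody : (fun (acc : List String) (ic : Int × String) =>
        pvSubtreeA d n ic.2 (pfx ++ (if last then "    " else "│   "))
          (ic.1 == ((PySem.List.sorted (PySem.Dict.getD d name []) (fun x => x)).length : Int) - 1) acc)
      = (fun acc ic => acc ++ (pvGlueB (ic.1 == ((PySem.List.sorted (PySem.Dict.getD d name []) (fun x => x)).length : Int) - 1)
            (pvRenderB d n ic.2)).map (fun l => (pfx ++ (if last then "    " else "│   ")) ++ l)) := by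
      funext acc ic; exact ih ic.2 _ _ acc
    rw [hbody, PySem.List.foldl_append_eq_flatMap, PySem.List.foldl_append_eq_flatMap]
    simp [pvGlueB, List.map_flatMap, String.append_assoc, Function.comp_def]

theorem mem_foldl_update (l : List (List String)) :
    ∀ (s : PySem.Set String) (x : String),
      x ∈ l.foldl (fun s cs => PySem.Set.update s cs) s ↔ x ∈ s ∨ x ∈ l.flatMap (fun kids => kids) := by
  induction l with
  | nil => simp
  | cons h t ih =>
    intro s x
    simp [List.foldl_cons, ih, PySem.Set.mem_update, or_assoc]

theorem pv_toplevel_eq (d : PySem.Dict String (List String)) (roots : List String) (F : Nat) :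
    (PySem.List.enumerate roots).foldl
      (fun acc ir => pvSubtreeA d F ir.2 "" (ir.1 == (roots.length : Int) - 1) acc) []
    = (PySem.List.enumerate roots).foldl
      (fun acc ir => acc ++ pvGlueB (ir.1 == (roots.length : Int) - 1) (pvRenderB d F ir.2)) [] := by
  have hbody : (fun (acc : List String) (ir : Int × String) =>
      pvSubtreeA d F ir.2 "" (ir.1 == (roots.length : Int) - 1) acc)
    = (fun acc ir => acc ++ (pvGlueB (ir.1 == (roots.length : Int) - 1) (pvRenderB d F ir.2)).map (fun l => "" ++ l)) := by
    funext acc ir; exact pvSubtreeA_eq_glue d F ir.2 "" _ acc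
  rw [hbody]
  simp [String.empty_append]

theorem pv_roots_eq (d : PySem.Dict String (List String)) :
    ((PySem.Dict.keys d).filter
        (fun p => !(PySem.Set.contains ((PySem.Dict.values d).foldl (fun s cs => PySem.Set.update s cs) PySem.Set.empty) p)))
      = ((PySem.Dict.keys d).filter
        (fun k => !(PySem.Set.contains (PySem.Set.ofList ((PySem.Dict.values d).flatMap (fun kids => kids))) k))) := by
  apply List.filter_congr
  intro x _
  congr 1
  rw [Bool.eq_iff_iff, PySem.Set.contains_iff, PySem.Set.contains_iff, PySem.Set.mem_ofList,
      mem_foldl_update]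
  simp [PySem.Set.empty]

-- ===== VERDICT (by name: the statement is the Claim_ definition above) =====
theorem format_tree_output_py_spec : Claim_equal_format_tree_output_py := by
  intro tree rc _ _
  unfold Spec_format_tree_output_py format_tree_output_py format_tree_output_py_alt
  cases rc with
  | some r => dsimp only; rw [pv_toplevel_eq]
  | none => dsimp only; rw [pv_roots_eq, pv_toplevel_eq]
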